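-- pv_equiv track=rewrite | github.com/Pivot-Wealth-Digital/adviser_allocation | core/allocation.py | _find_prev_non_full_ooo_week
-- ===== SOURCE A (Python) =====
-- LEAVE_COL = 2
--
-- def _is_full_ooo_week(data, week_key: int) -> bool:
--     """Check if a week has Full OOO status."""
--     row = data.get(week_key, [])
--     if len(row) > LEAVE_COL:
--         return str(row[LEAVE_COL]).strip().lower() == "full"
--     return False
--
-- def _find_prev_non_full_ooo_week(data, sorted_weeks, start_week: int) -> int:
--     """Find the previous week that doesn't have Full OOO status."""
--     # Find the index of start_week or the closest week before it
--     start_idx = None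
--     for i, week in enumerate(sorted_weeks):
--         if week >= start_week:
--             start_idx = i
--             break
--
--     if start_idx is None:
--         start_idx = len(sorted_weeks)
--
--     # Look backwards from start_idx
--     for i in range(start_idx - 1, -1, -1):
--         week = sorted_weeks[i]
--         if not _is_full_ooo_week(data, week):
--             return week
--
--     # If no previous non-Full OOO week found, return the first week - 7 days
--     return sorted_weeks[0] - 7 if sorted_weeks else start_week - 7
-- ===== SOURCE B (Python) =====
-- LEAVE_COL = 2
--
-- def _is_full_ooo_week(data, week_key: int) -> bool:
--     """Check if a week has Full OOO status."""
--     row = data.get(week_key, [])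
--     if len(row) > LEAVE_COL:
--         return str(row[LEAVE_COL]).strip().lower() == "full"
--     return False
--
-- def _find_prev_non_full_ooo_week(data, sorted_weeks, start_week: int) -> int:
--     """Single forward pass: remember the last non-Full-OOO week seen before the
--     first week that reaches start_week; no index arithmetic, no backward scan."""
--     best = None
--     for week in sorted_weeks:
--         if week >= start_week:
--             break
--         if not _is_full_ooo_week(data, week):
--             best = week
--     if best is not None:
--         return best
--     return sorted_weeks[0] - 7 if sorted_weeks else start_week - 7
-- ===== Notes on version B (the rewrite author's own statement) =====
-- stated objective: simpler
-- what changed: Replaced A's two-phase structure (forward enumerate to find the start index, then an index-based backward scan) with a single forward pass that keeps the last qualifying week in an accumulator; the index computation and backward loop disappear.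
import Mathlib
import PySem

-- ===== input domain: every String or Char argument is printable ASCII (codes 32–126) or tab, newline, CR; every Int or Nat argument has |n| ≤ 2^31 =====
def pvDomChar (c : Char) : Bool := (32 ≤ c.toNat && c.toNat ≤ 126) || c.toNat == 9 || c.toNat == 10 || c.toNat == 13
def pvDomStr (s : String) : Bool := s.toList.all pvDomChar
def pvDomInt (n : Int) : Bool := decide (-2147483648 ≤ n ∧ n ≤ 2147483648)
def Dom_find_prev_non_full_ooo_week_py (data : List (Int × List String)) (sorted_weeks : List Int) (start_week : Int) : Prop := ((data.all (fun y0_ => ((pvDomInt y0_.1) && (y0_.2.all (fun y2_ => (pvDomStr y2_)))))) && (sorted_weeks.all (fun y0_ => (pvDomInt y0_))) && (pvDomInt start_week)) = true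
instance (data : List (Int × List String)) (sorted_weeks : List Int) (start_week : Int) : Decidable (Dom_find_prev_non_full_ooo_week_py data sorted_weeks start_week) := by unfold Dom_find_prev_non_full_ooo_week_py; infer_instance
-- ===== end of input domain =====

-- B replaces A's two-phase structure (find start index, then index-based backward scan)
-- with a single forward pass keeping the last qualifying week in an accumulator (objective: simpler).

-- ===== PORT A =====

-- _is_full_ooo_week (shared helper of both versions; row elements are already strings, so str() is the identity)
def pvIsFullOoo (data : List (Int × List String)) (week_key : Int) : Bool :=
  let row := PySem.Dict.getD (PySem.Dict.mk data) week_key []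
  if row.length > 2 then
    PySem.Str.lower (PySem.Str.strip (row.getD 2 "")) == "full"  -- row[LEAVE_COL]: index 2 < length, in range
  else false

-- first loop of A: first index i with sorted_weeks[i] ≥ start_week (enumerate + break)
def pvStartIdx (sorted_weeks : List Int) (start_week : Int) : Option Nat :=
  match sorted_weeks with
  | [] => none
  | w :: rest => if w ≥ start_week then some 0 else (pvStartIdx rest start_week).map (· + 1)

-- second loop of A: for i in range(start_idx-1, -1, -1), return sorted_weeks[i] if not full OOO
def pvScanBack (data : List (Int × List String)) (sorted_weeks : List Int) : Nat → Option Int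
  | 0 => none
  | k + 1 =>
    let week := sorted_weeks.getD k 0  -- index k is provably in range whenever A reaches it
    if !(pvIsFullOoo data week) then some week else pvScanBack data sorted_weeks k

def find_prev_non_full_ooo_week_py (data : List (Int × List String)) (sorted_weeks : List Int) (start_week : Int) : Int :=
  -- start_idx = first index ≥ start_week, or len(sorted_weeks) if none
  match pvScanBack data sorted_weeks ((pvStartIdx sorted_weeks start_week).getD sorted_weeks.length) with
  | some week => week
  | none =>
    match sorted_weeks with
    | [] => start_week - 7
    | w :: _ => w - 7

-- ===== PORT B =====

-- B's single forward pass: accumulator 'best' = last non-Full-OOO week seen before the break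
def pvForward (data : List (Int × List String)) (start_week : Int) :
    List Int → Option Int → Option Int
  | [], best => best
  | week :: rest, best =>
    if week ≥ start_week then best
    else pvForward data start_week rest (if !(pvIsFullOoo data week) then some week else best)

def find_prev_non_full_ooo_week_py_alt (data : List (Int × List String)) (sorted_weeks : List Int) (start_week : Int) : Int :=
  match pvForward data start_week sorted_weeks none with
  | some week => week
  | none =>
    match sorted_weeks with
    | [] => start_week - 7
    | w :: _ => w - 7

-- ===== PRECONDITION & SPEC =====
def Spec_find_prev_non_full_ooo_week_py (data : List (Int × List String)) (sorted_weeks : List Int) (start_week : Int) (out : Int) : Prop := out = find_prev_non_full_ooo_week_py_alt data sorted_weeks start_week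
instance (data : List (Int × List String)) (sorted_weeks : List Int) (start_week : Int) (out : Int) : Decidable (Spec_find_prev_non_full_ooo_week_py data sorted_weeks start_week out) := by unfold Spec_find_prev_non_full_ooo_week_py; infer_instance

-- ===== CLAIM (what is proved, stated in full; the proofs are below) =====
def Claim_equal_find_prev_non_full_ooo_week_py : Prop := ∀ (data : List (Int × List String)) (sorted_weeks : List Int) (start_week : Int), Dom_find_prev_non_full_ooo_week_py data sorted_weeks start_week → Spec_find_prev_non_full_ooo_week_py data sorted_weeks start_week (find_prev_non_full_ooo_week_py data sorted_weeks start_week)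

-- ===== LEMMAS AND PROOFS =====

-- A's start index = length of the prefix of weeks < start_week
theorem pvStartIdx_eq_takeWhile (sorted_weeks : List Int) (start_week : Int) :
    (pvStartIdx sorted_weeks start_week).getD sorted_weeks.length
      = (sorted_weeks.takeWhile (fun w => decide (w < start_week))).length := by
  induction sorted_weeks with
  | nil => rfl
  | cons w rest ih =>
    by_cases h : w ≥ start_week
    · simp [pvStartIdx, h, show ¬ w < start_week by omega]
    · have hlt : w < start_week := by omega
      cases hc : pvStartIdx rest start_week with
      | none =>
        simp only [hc, Option.getD_none] at ih
        simp [pvStartIdx, if_neg h, hc, hlt, ← ih]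
      | some k =>
        simp only [hc, Option.getD_some] at ih
        simp [pvStartIdx, if_neg h, hc, hlt, ← ih]

-- A's backward scan over the first n elements = find? on the reversed prefix
theorem pvScanBack_eq_find (data : List (Int × List String)) (ws : List Int) (n : Nat)
    (hn : n ≤ ws.length) :
    pvScanBack data ws n
      = ((ws.take n).reverse).find? (fun w => !(pvIsFullOoo data w)) := by
  induction n with
  | zero => simp [pvScanBack]
  | succ k ih =>
    have hk : k < ws.length := by omega
    have htake : ws.take (k + 1) = ws.take k ++ [ws[k]] := by
      rw [List.take_add_one]
      simp [List.getElem?_eq_getElem hk]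
    rw [pvScanBack, htake]
    have hgetD : ws.getD k 0 = ws[k] := by
      simp [List.getD, List.getElem?_eq_getElem hk]
    simp only [List.reverse_append, List.reverse_cons, List.reverse_nil, List.nil_append,
      List.cons_append, List.find?, hgetD]
    by_cases hfull : pvIsFullOoo data ws[k]
    · simp [hfull, ih (by omega)]
    · simp [hfull]

-- B's forward pass = find? on the reversed prefix, falling back to the accumulator
theorem pvForward_eq_find (data : List (Int × List String)) (start_week : Int)
    (ws : List Int) (best : Option Int) :
    pvForward data start_week ws best
      = (((ws.takeWhile (fun w => decide (w < start_week))).reverse).find?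
           (fun w => !(pvIsFullOoo data w))).or best := by
  induction ws generalizing best with
  | nil => simp [pvForward]
  | cons w rest ih =>
    by_cases h : w ≥ start_week
    · simp [pvForward, h, show ¬ w < start_week by omega]
    · have hlt : w < start_week := by omega
      rw [pvForward, if_neg h, ih]
      simp only [List.takeWhile_cons, decide_eq_true hlt, if_pos, List.reverse_cons,
        List.find?_append, List.find?]
      by_cases hfull : pvIsFullOoo data w
      · simp [hfull]
      · simp [hfull]

-- ===== VERDICT (by name: the statement is the Claim_ definition above) =====
theorem find_prev_non_full_ooo_week_py_spec : Claim_equal_find_prev_non_full_ooo_week_py := by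
  intro data sorted_weeks start_week _
  show _ = _
  unfold find_prev_non_full_ooo_week_py find_prev_non_full_ooo_week_py_alt
  have hpre := List.takeWhile_prefix (l := sorted_weeks) (p := fun w => decide (w < start_week))
  rw [pvStartIdx_eq_takeWhile,
      pvScanBack_eq_find data sorted_weeks _ hpre.length_le,
      (List.prefix_iff_eq_take.mp hpre).symm,
      pvForward_eq_find]
  simp
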